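-- pv_equiv track=rewrite | github.com/deepset-ai/haystack | haystack/nodes/extractor/entity.py | convert_predictions_to_text_spans
-- ===== SOURCE A (Python) =====
-- from typing import List, Union, Dict, Optional, Tuple
--
-- def convert_predictions_to_text_spans(texts_with_char_positions: List[List[tuple]], predictions: List[List[str]]):
--     """Convert predictions output from `self.predict` into labels with original text spans. The output has shape
--     number of docs by number of words in each doc. Additionally, this function implements the logic for how to
--     combine 'B-' and 'I-' entities.
--
--     Example:
--         - For the prediction `["B-ATTACKER", "I-ATTACKER"]` the two words will be combined into one entity.
--         - For the prediction `["B-DEFENDER", "O", "I-DEFENDER"]` only the word labeled "B-DEFENDER" will be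
--         considered as the entity and the word labeled as "I-DEFENDER" will be ignored since they are separated by
--         the "O" label.
--         - For the prediction `["O", "O", "I-VICTIM", "O", "O"]` no entities will be returned since the word
--         labeled as "I-VICTIM" does not have a "B-VICTIM" immediately before it.
--
--     :param texts_with_char_positions: List of outputs from `self.pre_tokenizer.pre_tokenize_str`
--     :param predictions: predictions providing the most likely label name for each word in a list of docs
--                         (has shape # of docs x # of words in doc)
--     """
--     assert len(texts_with_char_positions) == len(predictions)
--
--     all_labels_w_positions = []
--     for text_idx, text in enumerate(texts_with_char_positions):
--         doc_labels_w_positions = []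
--         for word_idx, word_tuple in enumerate(text):
--             word_label = predictions[text_idx][word_idx]
--
--             if "B-" in word_label:
--                 final_word_label = word_label[2:]  # Remove 'B-' prefix.
--                 start = word_tuple[1][0]
--                 end = word_tuple[1][1]
--                 # Check for all intermediate entities (I-) and combine together.
--                 for i in range(word_idx + 1, len(predictions[text_idx])):
--                     next_word_label = predictions[text_idx][i]
--                     next_word_tuple = text[i]
--                     if "I-" in next_word_label and word_label[2:] == next_word_label[2:]:
--                         end = next_word_tuple[1][1]
--                     else:
--                         break
--             # Skip all non-relevant words
--             elif "O" in word_label: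
--                 continue
--             # Skip all intermediate (I-) entities. They are checked for in the 'B-' branch.
--             elif "I-" in word_label:
--                 continue
--             else:
--                 raise ValueError(f"Unexpected label {word_label} in predictions")
--
--             doc_labels_w_positions.append((start, end, final_word_label))
--         all_labels_w_positions.append(doc_labels_w_positions)
--
--     return all_labels_w_positions
-- ===== SOURCE B (Python) =====
-- def convert_predictions_to_text_spans(texts_with_char_positions, predictions):
--     """Single linear pass per doc with an explicit open-entity state instead of
--     A's quadratic look-ahead rescan at every 'B-' word."""
--     assert len(texts_with_char_positions) == len(predictions)
--
--     all_labels_w_positions = []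
--     for text, labels in zip(texts_with_char_positions, predictions):
--         spans = []
--         open_ent = None  # (key, start, end)
--         for word_tuple, label in zip(text, labels):
--             if open_ent is not None and "I-" in label and label[2:] == open_ent[0]:
--                 # label continues the open entity
--                 open_ent = (open_ent[0], open_ent[1], word_tuple[1][1])
--                 continue
--             if open_ent is not None:
--                 spans.append((open_ent[1], open_ent[2], open_ent[0]))
--                 open_ent = None
--             if "B-" in label:
--                 open_ent = (label[2:], word_tuple[1][0], word_tuple[1][1])
--             elif "O" in label or "I-" in label:
--                 pass
--             else:
--                 raise ValueError(f"Unexpected label {label} in predictions")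
--         if open_ent is not None:
--             spans.append((open_ent[1], open_ent[2], open_ent[0]))
--         all_labels_w_positions.append(spans)
--     return all_labels_w_positions
-- ===== Notes on version B (the rewrite author's own statement) =====
-- stated objective: alternative
-- what changed: A rescans forward over the whole remaining label row at every 'B-' word to find the chain end; B makes a single linear pass per doc over zip(text, labels) carrying an explicit open-entity state (key, start, end) that is extended by matching 'I-' labels and flushed otherwise.
-- outside the precondition, e.g. on convert_predictions_to_text_spans([[('a', (0, 1)), ('b', (2, 3))]], [['O']]): A raises IndexError, B returns [[]]; on convert_predictions_to_text_spans([[('a', (0, 1))]], [['B-X', 'I-X']]): A raises IndexError, B returns [[(0, 1, 'X')]]; on convert_predictions_to_text_spans([[('a', (0, 1))]], [['Z']]): A raises ValueError, B raises ValueError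
import Mathlib
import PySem

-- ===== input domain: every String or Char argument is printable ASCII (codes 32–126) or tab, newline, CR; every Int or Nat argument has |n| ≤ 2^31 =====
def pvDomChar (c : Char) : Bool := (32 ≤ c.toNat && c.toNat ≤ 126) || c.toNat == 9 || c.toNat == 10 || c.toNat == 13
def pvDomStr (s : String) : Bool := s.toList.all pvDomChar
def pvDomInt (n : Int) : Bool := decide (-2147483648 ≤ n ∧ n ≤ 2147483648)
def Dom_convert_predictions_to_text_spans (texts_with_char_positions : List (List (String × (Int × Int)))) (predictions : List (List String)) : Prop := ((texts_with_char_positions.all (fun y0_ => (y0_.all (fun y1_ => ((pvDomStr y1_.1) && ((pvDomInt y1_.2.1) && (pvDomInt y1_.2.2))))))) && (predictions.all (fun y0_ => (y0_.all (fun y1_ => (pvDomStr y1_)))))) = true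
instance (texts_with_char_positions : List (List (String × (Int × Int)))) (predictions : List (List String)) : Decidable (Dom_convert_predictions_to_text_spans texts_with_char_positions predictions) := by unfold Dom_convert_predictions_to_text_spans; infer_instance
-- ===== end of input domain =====

-- B replaces A's quadratic look-ahead rescan at every 'B-' word by one linear pass per doc
-- with an explicit open-entity state (key, start, end); equivalence is claimed on Pre_ below.

-- ===== PORT A =====
-- A's inner look-ahead loop: 'for i in range(word_idx+1, len(row)): … else: break'
def pvInnerA (row : List String) (text : List (String × (Int × Int))) (key : String) : Int → List Int → Int
  | e, [] => e
  | e, i :: rest =>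
      let nL := PySem.List.pyGetD row i ""
      let nT := PySem.List.pyGetD text i ("", (0, 0))
      if PySem.Str.isIn "I-" nL && (key == PySem.Str.slice nL (some 2) none) then
        pvInnerA row text key nT.2.2 rest
      else e  -- break

-- A's per-doc loop body (the 'else: raise ValueError' branch is excluded by Pre_; there the fold leaves acc)
def pvBodyA (row : List String) (text : List (String × (Int × Int)))
    (acc : List (Int × Int × String)) (q : Int × (String × (Int × Int))) : List (Int × Int × String) :=
  let L := PySem.List.pyGetD row q.1 ""
  if PySem.Str.isIn "B-" L then
    let key := PySem.Str.slice L (some 2) none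
    let s := q.2.2.1
    let e := pvInnerA row text key q.2.2.2 (PySem.List.pyRange (q.1 + 1) (row.length : Int) 1)
    acc ++ [(s, e, key)]
  else if PySem.Str.isIn "O" L then acc
  else if PySem.Str.isIn "I-" L then acc
  else acc

def pvDocA (text : List (String × (Int × Int))) (row : List String) : List (Int × Int × String) :=
  (PySem.List.enumerate text 0).foldl (pvBodyA row text) []

def convert_predictions_to_text_spans (texts_with_char_positions : List (List (String × (Int × Int)))) (predictions : List (List String)) : List (List (Int × Int × String)) :=
  (PySem.List.enumerate texts_with_char_positions 0).foldl (fun all p =>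
    all ++ [pvDocA p.2 (PySem.List.pyGetD predictions p.1 [])]) []

-- ===== PORT B =====
-- one step of B's state machine; state = (emitted spans, open entity (key, start, end) or none)
def pvStepB (st : List (Int × Int × String) × Option (String × Int × Int))
    (p : (String × (Int × Int)) × String) : List (Int × Int × String) × Option (String × Int × Int) :=
  match st.2 with
  | some ks =>
      if PySem.Str.isIn "I-" p.2 && (PySem.Str.slice p.2 (some 2) none == ks.1) then
        (st.1, some (ks.1, ks.2.1, p.1.2.2))          -- label continues the open entity
      else
        let spans := st.1 ++ [(ks.2.1, ks.2.2, ks.1)] -- flush the open entity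
        if PySem.Str.isIn "B-" p.2 then
          (spans, some (PySem.Str.slice p.2 (some 2) none, p.1.2.1, p.1.2.2))
        else (spans, none)                             -- 'O'/'I-' pass (bad labels raise in Python: outside Pre_)
  | none =>
      if PySem.Str.isIn "B-" p.2 then
        (st.1, some (PySem.Str.slice p.2 (some 2) none, p.1.2.1, p.1.2.2))
      else (st.1, none)

-- final flush after the per-doc loop
def pvFinish (st : List (Int × Int × String) × Option (String × Int × Int)) : List (Int × Int × String) :=
  match st.2 with
  | none => st.1
  | some ks => st.1 ++ [(ks.2.1, ks.2.2, ks.1)]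

def pvDocB (text : List (String × (Int × Int))) (row : List String) : List (Int × Int × String) :=
  pvFinish ((text.zip row).foldl pvStepB ([], none))

def convert_predictions_to_text_spans_alt (texts_with_char_positions : List (List (String × (Int × Int)))) (predictions : List (List String)) : List (List (Int × Int × String)) :=
  (texts_with_char_positions.zip predictions).foldl (fun all p => all ++ [pvDocB p.1 p.2]) []

-- ===== PRECONDITION & SPEC =====
def pvValidLabel (L : String) : Bool :=
  (PySem.Str.isIn "B-" L || PySem.Str.isIn "O" L || PySem.Str.isIn "I-" L)
    && !(PySem.Str.isIn "B-" L && PySem.Str.isIn "I-" L)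

-- label k of row continues a chain with key `key` (A's inner-loop test)
def pvExt (row : List String) (key : String) (k : Nat) : Bool :=
  PySem.Str.isIn "I-" (row.getD k "") && (key == PySem.Str.slice (row.getD k "") (some 2) none)

-- some 'B-' chain runs through every remaining word of the text window (positions < n)
def pvReaches (row : List String) (n : Nat) : Bool :=
  (List.range n).any (fun j => PySem.Str.isIn "B-" (row.getD j "") &&
    (List.range n).all (fun k => !(decide (j < k))
      || pvExt row (PySem.Str.slice (row.getD j "") (some 2) none) k))

-- Pre_ excludes: outer lists of different lengths (A's assert fails) and docs with fewer labels than
-- words (A raises IndexError); labels in the text window without any of 'B-'/'O'/'I-' (A raises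
-- ValueError); surplus labels combined with a 'B-' chain running to the end of the text window (A's
-- look-ahead then raises IndexError); and window labels containing BOTH 'B-' and 'I-', a malformed
-- tag on which A's independent substring tests let one word simultaneously extend the previous
-- entity and start a new one — a defensible-corner artefact no caller would specify.
def Pre_convert_predictions_to_text_spans (texts_with_char_positions : List (List (String × (Int × Int)))) (predictions : List (List String)) : Prop :=
  texts_with_char_positions.length = predictions.length ∧
  ∀ p ∈ texts_with_char_positions.zip predictions,
    p.1.length ≤ p.2.length ∧
    (∀ L ∈ p.2.take p.1.length, pvValidLabel L = true) ∧
    (p.1.length < p.2.length → pvReaches p.2 p.1.length = false)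
instance (texts_with_char_positions : List (List (String × (Int × Int)))) (predictions : List (List String)) : Decidable (Pre_convert_predictions_to_text_spans texts_with_char_positions predictions) := by unfold Pre_convert_predictions_to_text_spans; infer_instance

def pvWitness_convert_predictions_to_text_spans : (List (List (String × (Int × Int)))) × List (List String) :=
  ([[("Alice", (0, 5)), ("was", (6, 9)), ("here", (10, 14))]], [["B-PER", "I-PER", "O"]])

def Spec_convert_predictions_to_text_spans (texts_with_char_positions : List (List (String × (Int × Int)))) (predictions : List (List String)) (out : List (List (Int × Int × String))) : Prop := out = convert_predictions_to_text_spans_alt texts_with_char_positions predictions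
instance (texts_with_char_positions : List (List (String × (Int × Int)))) (predictions : List (List String)) (out : List (List (Int × Int × String))) : Decidable (Spec_convert_predictions_to_text_spans texts_with_char_positions predictions out) := by unfold Spec_convert_predictions_to_text_spans; infer_instance

-- ===== CLAIM (what is proved, stated in full; the proofs are below) =====
def Claim_equal_convert_predictions_to_text_spans : Prop := ∀ (texts_with_char_positions : List (List (String × (Int × Int)))) (predictions : List (List String)), Dom_convert_predictions_to_text_spans texts_with_char_positions predictions → Pre_convert_predictions_to_text_spans texts_with_char_positions predictions → Spec_convert_predictions_to_text_spans texts_with_char_positions predictions (convert_predictions_to_text_spans texts_with_char_positions predictions)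

-- ===== LEMMAS AND PROOFS =====

-- the end position of the maximal matching 'I-' chain at the head of the (word, label) list
def pvChainEnd (key : String) : Int → List ((String × (Int × Int)) × String) → Int
  | e, [] => e
  | e, p :: rest =>
      if PySem.Str.isIn "I-" p.2 && (key == PySem.Str.slice p.2 (some 2) none) then
        pvChainEnd key p.1.2.2 rest
      else e

-- the common per-doc specification, a structural recursion over the zipped doc
def pvSpec : List ((String × (Int × Int)) × String) → List (Int × Int × String)
  | [] => []
  | p :: rest =>
      if PySem.Str.isIn "B-" p.2 then
        (p.1.2.1, pvChainEnd (PySem.Str.slice p.2 (some 2) none) p.1.2.2 rest,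
          PySem.Str.slice p.2 (some 2) none) :: pvSpec rest
      else pvSpec rest

theorem pvDropSucc {α : Type} {l : List α} {j : Nat} {x : α} {xs : List α}
    (h : l.drop j = x :: xs) : l.drop (j + 1) = xs := by
  rw [← List.tail_drop, h]
  rfl

theorem pvDropNeNil {α : Type} {l : List α} {j : Nat} {x : α} {xs : List α}
    (h : l.drop j = x :: xs) : j < l.length := by
  by_contra hc
  rw [List.drop_eq_nil_of_le (by omega)] at h
  simp at h

theorem pvStepB_fold (l : List ((String × (Int × Int)) × String))
    (hv : ∀ p ∈ l, ¬(PySem.Str.isIn "B-" p.2 = true ∧ PySem.Str.isIn "I-" p.2 = true)) :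
    (∀ spans, pvFinish (l.foldl pvStepB (spans, none)) = spans ++ pvSpec l) ∧
    (∀ spans k s e, pvFinish (l.foldl pvStepB (spans, some (k, s, e)))
        = spans ++ (s, pvChainEnd k e l, k) :: pvSpec l) := by
  induction l with
  | nil =>
    refine ⟨fun spans => ?_, fun spans k s e => ?_⟩
    · simp only [List.foldl_nil, pvFinish, pvSpec, List.append_nil]
    · simp only [List.foldl_nil, pvFinish, pvSpec, pvChainEnd]
  | cons p rest ih =>
    have hv' : ∀ q ∈ rest, ¬(PySem.Str.isIn "B-" q.2 = true ∧ PySem.Str.isIn "I-" q.2 = true) :=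
      fun q hq => hv q (List.mem_cons_of_mem _ hq)
    have ihr := ih hv'
    constructor
    · intro spans
      simp only [List.foldl_cons, pvStepB]
      by_cases hB : PySem.Str.isIn "B-" p.2 = true
      · rw [if_pos hB, ihr.2]
        simp only [pvSpec]
        rw [if_pos hB]
      · rw [if_neg hB, ihr.1]
        simp only [pvSpec]
        rw [if_neg hB]
    · intro spans k s e
      simp only [List.foldl_cons, pvStepB]
      by_cases hC : (PySem.Str.isIn "I-" p.2 && (PySem.Str.slice p.2 (some 2) none == k)) = true
      · obtain ⟨hI, hE⟩ := (Bool.and_eq_true _ _).mp hC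
        have hnB : ¬ PySem.Str.isIn "B-" p.2 = true := fun hB => hv p List.mem_cons_self ⟨hB, hI⟩
        have hC' : (PySem.Str.isIn "I-" p.2 && (k == PySem.Str.slice p.2 (some 2) none)) = true :=
          (Bool.and_eq_true _ _).mpr ⟨hI, beq_iff_eq.mpr (eq_of_beq hE).symm⟩
        rw [if_pos hC, ihr.2]
        simp only [pvSpec, pvChainEnd]
        rw [if_neg hnB, if_pos hC']
      · have hC' : ¬ (PySem.Str.isIn "I-" p.2 && (k == PySem.Str.slice p.2 (some 2) none)) = true := by
          intro h
          obtain ⟨h1, h2⟩ := (Bool.and_eq_true _ _).mp h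
          exact hC ((Bool.and_eq_true _ _).mpr ⟨h1, beq_iff_eq.mpr (eq_of_beq h2).symm⟩)
        rw [if_neg hC]
        by_cases hB : PySem.Str.isIn "B-" p.2 = true
        · rw [if_pos hB, ihr.2]
          simp only [pvSpec, pvChainEnd]
          rw [if_neg hC', if_pos hB, List.append_assoc]
          rfl
        · rw [if_neg hB, ihr.1]
          simp only [pvSpec, pvChainEnd]
          rw [if_neg hC', if_neg hB, List.append_assoc]
          rfl

theorem pvZipTake {α β : Type} : ∀ (xs : List α) (ys : List β),
    xs.zip (ys.take xs.length) = xs.zip ys := by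
  intro xs
  induction xs with
  | nil => intro ys; rfl
  | cons x xs ih =>
    intro ys
    cases ys with
    | nil => rfl
    | cons y ys => simp [List.zip_cons_cons, ih ys]

theorem pvDocB_eq_spec (text : List (String × (Int × Int))) (row : List String)
    (hv : ∀ L ∈ row.take text.length, pvValidLabel L = true) :
    pvDocB text row = pvSpec (text.zip (row.take text.length)) := by
  have hv' : ∀ p ∈ text.zip (row.take text.length),
      ¬(PySem.Str.isIn "B-" p.2 = true ∧ PySem.Str.isIn "I-" p.2 = true) := by
    intro p hp hand
    have hL : p.2 ∈ row.take text.length := (List.of_mem_zip hp).2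
    have hV := hv p.2 hL
    have h1 := hand.1
    have h2 := hand.2
    simp [pvValidLabel] at hV
    simp at h1 h2
    simp [h1, h2] at hV
  have := (pvStepB_fold (text.zip (row.take text.length)) hv').1 []
  unfold pvDocB
  rw [← pvZipTake]
  simpa using this

theorem pvGetRow {row : List String} {n j : Nat} {L : String} {rl' : List String}
    (h : (row.take n).drop j = L :: rl') (hj : j < n) : row[j]? = some L := by
  have h0 : ((row.take n).drop j)[0]? = some L := by rw [h]; rfl
  rw [List.getElem?_drop] at h0
  rwa [List.getElem?_take_of_lt (by omega)] at h0

theorem pvInnerA_eq (text : List (String × (Int × Int))) (row : List String)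
    (hle : text.length ≤ row.length) :
    ∀ (tl : List (String × (Int × Int))) (rl : List String) (j : Nat) (e : Int) (key : String),
      text.drop j = tl → (row.take text.length).drop j = rl → j ≤ text.length →
      ((∀ k, k < text.length → j ≤ k → pvExt row key k = true) → text.length = row.length) →
      pvInnerA row text key e (PySem.List.pyRange (j : Int) (row.length : Int) 1)
        = pvChainEnd key e (tl.zip rl) := by
  intro tl
  induction tl with
  | nil =>
    intro rl j e key ht hr hjn H
    have hj : text.length ≤ j := by
      have := congrArg List.length ht; simp at this; omega
    have hn : text.length = row.length := H (fun k hk hjk => absurd (by omega : k < j) (by omega))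
    rw [PySem.List.pyRange_one_eq_nil (by exact_mod_cast (show row.length ≤ j by omega))]
    rfl
  | cons w tl' ih =>
    intro rl j e key ht hr hjn H
    have hjt : j < text.length := pvDropNeNil ht
    have hjr : j < row.length := by omega
    obtain ⟨L, rl', hr'⟩ : ∃ L rl', (row.take text.length).drop j = L :: rl' := by
      cases h : (row.take text.length).drop j with
      | nil =>
        exfalso
        have := List.drop_eq_nil_iff.mp h
        rw [List.length_take] at this
        omega
      | cons a b => exact ⟨a, b, rfl⟩
    rw [hr] at hr'
    subst hr'
    have hrow : row[j]? = some L := pvGetRow hr hjt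
    have hgetr : PySem.List.pyGetD row (j : Int) "" = L := by
      rw [PySem.List.pyGetD_natCast]
      simp [List.getD_eq_getElem?_getD, hrow]
    have hgett : PySem.List.pyGetD text (j : Int) ("", (0, 0)) = w := by
      rw [PySem.List.pyGetD_natCast]
      have : text[j]? = some w := by
        have h0 : (text.drop j)[0]? = some w := by rw [ht]; rfl
        simpa using h0
      simp [List.getD_eq_getElem?_getD, this]
    rw [PySem.List.pyRange_one_cons (by exact_mod_cast hjr)]
    have ht' : text.drop (j + 1) = tl' := pvDropSucc ht
    have hr'' : (row.take text.length).drop (j + 1) = rl' := pvDropSucc hr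
    have hext : pvExt row key j
        = (PySem.Str.isIn "I-" L && (key == PySem.Str.slice L (some 2) none)) := by
      simp [pvExt, List.getD_eq_getElem?_getD, hrow]
    simp only [List.zip_cons_cons, pvInnerA, hgetr, hgett, pvChainEnd]
    have hcast : ((j : Int) + 1) = ((j + 1 : Nat) : Int) := by push_cast; ring
    by_cases hC : (PySem.Str.isIn "I-" L && (key == PySem.Str.slice L (some 2) none)) = true
    · have H' : (∀ k, k < text.length → j + 1 ≤ k → pvExt row key k = true) →
          text.length = row.length := by
        intro hall
        refine H (fun k hk hjk => ?_)
        rcases Nat.eq_or_lt_of_le hjk with hkj | hkj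
        · rw [← hkj, hext]; exact hC
        · exact hall k hk (by omega)
      rw [if_pos hC, if_pos hC, hcast, ih rl' (j + 1) w.2.2 key ht' hr'' (by omega) H']
    · rw [if_neg hC, if_neg hC]

theorem pvDocA_eq_spec (text : List (String × (Int × Int))) (row : List String)
    (hle : text.length ≤ row.length)
    (hsafe : text.length < row.length → pvReaches row text.length = false) :
    pvDocA text row = pvSpec (text.zip (row.take text.length)) := by
  suffices h : ∀ (tl : List (String × (Int × Int))) (rl : List String) (j : Nat)
      (acc : List (Int × Int × String)),
      text.drop j = tl → (row.take text.length).drop j = rl → j ≤ text.length →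
      (PySem.List.enumerate tl (j : Int)).foldl (pvBodyA row text) acc = acc ++ pvSpec (tl.zip rl) by
    have := h text (row.take text.length) 0 [] (by simp) (by simp) (by omega)
    simpa [pvDocA] using this
  intro tl
  induction tl with
  | nil => intro rl j acc ht hr hjn; simp [PySem.List.enumerate_nil, pvSpec]
  | cons w tl' ih =>
    intro rl j acc ht hr hjn
    have hjt : j < text.length := pvDropNeNil ht
    have hjr : j < row.length := by omega
    obtain ⟨L, rl', hr'⟩ : ∃ L rl', (row.take text.length).drop j = L :: rl' := by
      cases h : (row.take text.length).drop j with
      | nil =>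
        exfalso
        have := List.drop_eq_nil_iff.mp h
        rw [List.length_take] at this
        omega
      | cons a b => exact ⟨a, b, rfl⟩
    rw [hr] at hr'
    subst hr'
    have hrow : row[j]? = some L := pvGetRow hr hjt
    have hgetr : PySem.List.pyGetD row (j : Int) "" = L := by
      rw [PySem.List.pyGetD_natCast]
      simp [List.getD_eq_getElem?_getD, hrow]
    have ht' : text.drop (j + 1) = tl' := pvDropSucc ht
    have hr'' : (row.take text.length).drop (j + 1) = rl' := pvDropSucc hr
    have hcast : ((j : Int) + 1) = ((j + 1 : Nat) : Int) := by push_cast; ring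
    rw [PySem.List.enumerate_cons, List.foldl_cons]
    have hbody : pvBodyA row text acc ((j : Int), w)
        = if PySem.Str.isIn "B-" L then
            acc ++ [(w.2.1,
              pvInnerA row text (PySem.Str.slice L (some 2) none) w.2.2
                (PySem.List.pyRange ((j : Int) + 1) (row.length : Int) 1),
              PySem.Str.slice L (some 2) none)]
          else acc := by
      simp only [pvBodyA, hgetr]
      by_cases hB : PySem.Str.isIn "B-" L = true
      · rw [if_pos hB, if_pos hB]
      · rw [if_neg hB, if_neg hB]
        split_ifs <;> rfl
    rw [hbody]
    by_cases hB : PySem.Str.isIn "B-" L = true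
    · have H : (∀ k, k < text.length → j + 1 ≤ k →
          pvExt row (PySem.Str.slice L (some 2) none) k = true) → text.length = row.length := by
        intro hall
        by_contra hne
        have hlt : text.length < row.length := by omega
        have hfalse := hsafe hlt
        have htrue : pvReaches row text.length = true := by
          simp only [pvReaches, List.any_eq_true, List.mem_range]
          refine ⟨j, hjt, ?_⟩
          rw [Bool.and_eq_true]
          have hgetD : row.getD j "" = L := by
            simp [List.getD_eq_getElem?_getD, hrow]
          refine ⟨by rw [hgetD]; exact hB, ?_⟩
          rw [List.all_eq_true]
          intro k hk
          rw [List.mem_range] at hk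
          rw [Bool.or_eq_true]
          by_cases hjk : j < k
          · right; rw [hgetD]; exact hall k hk (by omega)
          · left; simp [hjk]
        rw [hfalse] at htrue
        exact Bool.noConfusion htrue
      rw [if_pos hB, hcast,
        pvInnerA_eq text row hle tl' rl' (j + 1) w.2.2 _ ht' hr'' (by omega) H,
        ih rl' (j + 1) _ ht' hr'' (by omega), List.zip_cons_cons]
      simp only [pvSpec]
      rw [if_pos hB, List.append_assoc]
      rfl
    · rw [if_neg hB, hcast, ih rl' (j + 1) acc ht' hr'' (by omega), List.zip_cons_cons]
      simp only [pvSpec]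
      rw [if_neg hB]

theorem pvDoc_eq (text : List (String × (Int × Int))) (row : List String)
    (hle : text.length ≤ row.length)
    (hv : ∀ L ∈ row.take text.length, pvValidLabel L = true)
    (hsafe : text.length < row.length → pvReaches row text.length = false) :
    pvDocA text row = pvDocB text row := by
  rw [pvDocA_eq_spec text row hle hsafe, pvDocB_eq_spec text row hv]

theorem top_eq (texts : List (List (String × (Int × Int)))) (preds : List (List String)) :
    ∀ (ts : List (List (String × (Int × Int)))) (ps : List (List String)) (i : Nat)
      (acc : List (List (Int × Int × String))),
      texts.drop i = ts → preds.drop i = ps → ts.length = ps.length →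
      (∀ p ∈ ts.zip ps, p.1.length ≤ p.2.length ∧
        (∀ L ∈ p.2.take p.1.length, pvValidLabel L = true) ∧
        (p.1.length < p.2.length → pvReaches p.2 p.1.length = false)) →
      (PySem.List.enumerate ts (i : Int)).foldl (fun all p =>
          all ++ [pvDocA p.2 (PySem.List.pyGetD preds p.1 [])]) acc
        = acc ++ (ts.zip ps).map (fun p => pvDocB p.1 p.2) := by
  intro ts
  induction ts with
  | nil => intro ps i acc ht hp hl hpre; simp [PySem.List.enumerate_nil]
  | cons t ts' ih =>
    intro ps i acc ht hp hl hpre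
    obtain ⟨r, ps', rfl⟩ : ∃ r ps', ps = r :: ps' := by
      cases ps with
      | nil => exact absurd hl (by simp)
      | cons a b => exact ⟨a, b, rfl⟩
    have hip : i < preds.length := pvDropNeNil hp
    have hgetp : PySem.List.pyGetD preds (i : Int) [] = r := by
      rw [PySem.List.pyGetD_natCast]
      have : preds[i]? = some r := by
        have h0 : (preds.drop i)[0]? = some r := by rw [hp]; rfl
        simpa using h0
      simp [List.getD_eq_getElem?_getD, this]
    rw [PySem.List.enumerate_cons]
    simp only [List.foldl_cons, hgetp]
    have hcast : ((i : Int) + 1) = ((i + 1 : Nat) : Int) := by push_cast; ring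
    have ht' : texts.drop (i + 1) = ts' := pvDropSucc ht
    have hp' : preds.drop (i + 1) = ps' := pvDropSucc hp
    have hpre0 := hpre (t, r) (by simp)
    rw [hcast, ih ps' (i + 1) _ ht' hp' (by simpa using hl)
      (fun p hp2 => hpre p (List.mem_cons_of_mem _ hp2))]
    rw [pvDoc_eq t r hpre0.1 hpre0.2.1 hpre0.2.2]
    simp [List.append_assoc]

-- ===== VERDICT (by name: the statement is the Claim_ definition above) =====
theorem convert_predictions_to_text_spans_spec : Claim_equal_convert_predictions_to_text_spans := by
  intro texts preds _hdom hpre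
  obtain ⟨hlen, hpairs⟩ := hpre
  unfold Spec_convert_predictions_to_text_spans
  unfold convert_predictions_to_text_spans convert_predictions_to_text_spans_alt
  have h := top_eq texts preds texts preds 0 [] (by simp) (by simp) hlen hpairs
  simp only [Nat.cast_zero] at h
  rw [h]
  rw [PySem.List.foldl_append_singleton_eq_map]
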